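-- pv_equiv track=rewrite | github.com/itadrous73/test.starbattlelab.github.io | generator.py | generate_solution_grid
-- ===== SOURCE A (Python) =====
-- def generate_solution_grid(dim, stars_per_row_col):
--     grid = [[0] * dim for _ in range(dim)]
--     row_counts, col_counts = [0] * dim, [0] * dim
--
--     def is_valid(r, c):
--         if row_counts[r] >= stars_per_row_col or col_counts[c] >= stars_per_row_col: return False
--         for dr in [-1, 0, 1]:
--             for dc in [-1, 0, 1]:
--                 if dr == 0 and dc == 0: continue
--                 nr, nc = r + dr, c + dc
--                 if 0 <= nr < dim and 0 <= nc < dim and grid[nr][nc] == 1: return False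
--         return True
--
--     def solve_deterministic(cell_index=0):
--         if cell_index == dim*dim:
--             return sum(row_counts) == dim * stars_per_row_col
--
--         r,c = divmod(cell_index, dim)
--
--         # Try placing a star
--         if is_valid(r,c):
--             grid[r][c] = 1
--             row_counts[r] += 1; col_counts[c] += 1
--             if solve_deterministic(cell_index + 1): return True
--             grid[r][c] = 0 # backtrack
--             row_counts[r] -= 1; col_counts[c] -= 1
--
--         # Try not placing a star
--         if solve_deterministic(cell_index+1): return True
--         return False
--
--     if solve_deterministic(): return grid
--     return None
-- ===== SOURCE B (Python) =====
-- def generate_solution_grid(dim, stars_per_row_col):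
--     n = dim * dim
--     grid = [[0] * dim for _ in range(dim)]
--     row_counts, col_counts = [0] * dim, [0] * dim
--
--     def is_valid(r, c):
--         if row_counts[r] >= stars_per_row_col or col_counts[c] >= stars_per_row_col: return False
--         for dr in [-1, 0, 1]:
--             for dc in [-1, 0, 1]:
--                 if dr == 0 and dc == 0: continue
--                 nr, nc = r + dr, c + dc
--                 if 0 <= nr < dim and 0 <= nc < dim and grid[nr][nc] == 1: return False
--         return True
--
--     # Explicit iterative DFS, star-first then skip, mirroring the recursion's order.
--     stack = []          # frames (cell_index, placed): placed=True still owes the skip branch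
--     idx = 0
--     advancing = True
--     while True:
--         if advancing:
--             if idx == n:
--                 if sum(row_counts) == dim * stars_per_row_col:
--                     return grid
--                 advancing = False
--             else:
--                 r, c = divmod(idx, dim)
--                 if is_valid(r, c):
--                     grid[r][c] = 1
--                     row_counts[r] += 1; col_counts[c] += 1
--                     stack.append((idx, True))
--                 else:
--                     stack.append((idx, False))
--                 idx += 1
--         else:
--             if not stack:
--                 return None
--             i, placed = stack.pop()
--             if placed:
--                 r, c = divmod(i, dim)
--                 grid[r][c] = 0
--                 row_counts[r] -= 1; col_counts[c] -= 1
--                 stack.append((i, False))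
--                 idx = i + 1
--                 advancing = True
--             else:
--                 idx = i
-- ===== Notes on version B (the rewrite author's own statement) =====
-- stated objective: alternative
-- what changed: Replaces the recursive backtracking solver by an explicit iterative DFS over a manual stack of (cell_index, placed) frames with the same star-first/skip order, so B needs no recursion (and no recursion-depth limit).
import Mathlib
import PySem

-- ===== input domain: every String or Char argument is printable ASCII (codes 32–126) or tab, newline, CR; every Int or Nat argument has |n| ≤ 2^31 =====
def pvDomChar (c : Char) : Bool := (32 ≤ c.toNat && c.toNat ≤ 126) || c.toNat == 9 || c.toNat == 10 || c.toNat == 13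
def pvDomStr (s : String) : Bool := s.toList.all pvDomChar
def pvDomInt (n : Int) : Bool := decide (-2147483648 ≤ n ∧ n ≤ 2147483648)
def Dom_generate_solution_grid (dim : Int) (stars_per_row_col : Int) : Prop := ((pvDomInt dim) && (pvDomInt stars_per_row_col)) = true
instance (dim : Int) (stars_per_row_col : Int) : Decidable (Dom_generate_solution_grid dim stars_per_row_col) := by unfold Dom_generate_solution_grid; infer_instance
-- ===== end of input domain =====

-- B replaces A's recursive backtracker by an explicit-stack iterative DFS with the same
-- star-first/skip order (objective: alternative decomposition, same search, same first solution).

-- ===== PORT A =====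
-- shared helpers: Python's is_valid, `row_counts[r] += d`, `grid[r][c] = v`, used verbatim by both A and B
def sb_valid (dim stars : Int) (grid : List (List Int)) (rows cols : List Int) (r c : Int) : Bool :=
  if stars ≤ PySem.List.pyGetD rows r 0 ∨ stars ≤ PySem.List.pyGetD cols c 0 then false
  else
    !(([-1, 0, 1] : List Int).any fun dr =>
      ([-1, 0, 1] : List Int).any fun dc =>
        if dr = 0 ∧ dc = 0 then false
        else
          decide (0 ≤ r + dr ∧ r + dr < dim ∧ 0 ≤ c + dc ∧ c + dc < dim) &&
            (PySem.List.pyGetD (PySem.List.pyGetD grid (r + dr) []) (c + dc) 0 == 1))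

-- in-range list update (all updates in both programs use indices 0 ≤ i < len, where this is exact)
def sb_bump (xs : List Int) (i d : Int) : List Int := xs.set i.toNat (xs.getD i.toNat 0 + d)
def sb_set2 (g : List (List Int)) (r c v : Int) : List (List Int) :=
  g.set r.toNat ((g.getD r.toNat []).set c.toNat v)

-- A's solve_deterministic; state threaded functionally (Python mutates and undoes; on failure the
-- returned state is the undone state, exactly as in Python). fuel = dim*dim - cell_index on every
-- call (it only totalises the recursion; the 0-with-idx≠dim*dim branch is unreachable).
def sb_solve (dim stars : Int) (fuel : Nat) (idx : Int) (grid : List (List Int))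
    (rows cols : List Int) : Bool × List (List Int) × List Int × List Int :=
  if idx = dim * dim then
    (rows.sum == dim * stars, grid, rows, cols)
  else
    match fuel with
    | 0 => (false, grid, rows, cols)
    | fuel' + 1 =>
      let r := PySem.Int.floordiv idx dim
      let c := PySem.Int.mod idx dim
      if sb_valid dim stars grid rows cols r c then
        match sb_solve dim stars fuel' (idx + 1) (sb_set2 grid r c 1) (sb_bump rows r 1) (sb_bump cols c 1) with
        | (true, g1, rw1, cl1) => (true, g1, rw1, cl1)
        | (false, g2, rw2, cl2) =>
          sb_solve dim stars fuel' (idx + 1) (sb_set2 g2 r c 0) (sb_bump rw2 r (-1)) (sb_bump cl2 c (-1))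
      else
        sb_solve dim stars fuel' (idx + 1) grid rows cols

def generate_solution_grid (dim : Int) (stars_per_row_col : Int) : Option (List (List Int)) :=
  let grid := List.replicate dim.toNat (List.replicate dim.toNat (0 : Int))
  let rows := List.replicate dim.toNat (0 : Int)
  let cols := List.replicate dim.toNat (0 : Int)
  match sb_solve dim stars_per_row_col (dim * dim).toNat 0 grid rows cols with
  | (true, g, _, _) => some g
  | (false, _, _, _) => none

-- ===== PORT B =====
-- Source B's while-True machine: stack of frames (cell_index, placed). fuel only totalises the loop;
-- the proof shows 3^((dim*dim).toNat + 2) strictly exceeds the number of iterations, so the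
-- fuel-exhausted `none` is never the value used.
def sb_run (dim stars : Int) : Nat → Bool → Int → List (List Int) → List Int → List Int →
    List (Int × Bool) → Option (List (List Int))
  | 0, _, _, _, _, _, _ => none
  | fuel + 1, advancing, idx, grid, rows, cols, stack =>
    if advancing then
      if idx = dim * dim then
        if rows.sum == dim * stars then some grid
        else sb_run dim stars fuel false idx grid rows cols stack
      else
        let r := PySem.Int.floordiv idx dim
        let c := PySem.Int.mod idx dim
        if sb_valid dim stars grid rows cols r c then
          sb_run dim stars fuel true (idx + 1) (sb_set2 grid r c 1) (sb_bump rows r 1) (sb_bump cols c 1)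
            ((idx, true) :: stack)
        else
          sb_run dim stars fuel true (idx + 1) grid rows cols ((idx, false) :: stack)
    else
      match stack with
      | [] => none
      | (i, placed) :: rest =>
        if placed then
          let r := PySem.Int.floordiv i dim
          let c := PySem.Int.mod i dim
          sb_run dim stars fuel true (i + 1) (sb_set2 grid r c 0) (sb_bump rows r (-1)) (sb_bump cols c (-1))
            ((i, false) :: rest)
        else
          sb_run dim stars fuel false i grid rows cols rest

def generate_solution_grid_alt (dim : Int) (stars_per_row_col : Int) : Option (List (List Int)) :=
  let grid := List.replicate dim.toNat (List.replicate dim.toNat (0 : Int))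
  let rows := List.replicate dim.toNat (0 : Int)
  let cols := List.replicate dim.toNat (0 : Int)
  sb_run dim stars_per_row_col (3 ^ ((dim * dim).toNat + 2)) true 0 grid rows cols []

-- ===== PRECONDITION & SPEC =====
-- Pre_ excludes only inputs on which the Python A raises: dim < 0 raises IndexError in is_valid
-- (empty row_counts), and dim ≥ 32 makes the recursion depth dim*dim + 1 exceed CPython's default
-- recursion limit of 1000, raising RecursionError before any value is returned.
def Pre_generate_solution_grid (dim : Int) (stars_per_row_col : Int) : Prop :=
  0 ≤ dim ∧ dim ≤ 31
instance (dim : Int) (stars_per_row_col : Int) : Decidable (Pre_generate_solution_grid dim stars_per_row_col) := by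
  unfold Pre_generate_solution_grid; infer_instance

def pvWitness_generate_solution_grid : Int × Int := (4, 1)

def Spec_generate_solution_grid (dim : Int) (stars_per_row_col : Int) (out : Option (List (List Int))) : Prop := out = generate_solution_grid_alt dim stars_per_row_col
instance (dim : Int) (stars_per_row_col : Int) (out : Option (List (List Int))) : Decidable (Spec_generate_solution_grid dim stars_per_row_col out) := by unfold Spec_generate_solution_grid; infer_instance

-- ===== CLAIM (what is proved, stated in full; the proofs are below) =====
def Claim_equal_generate_solution_grid : Prop := ∀ (dim : Int) (stars_per_row_col : Int), Dom_generate_solution_grid dim stars_per_row_col → Pre_generate_solution_grid dim stars_per_row_col → Spec_generate_solution_grid dim stars_per_row_col (generate_solution_grid dim stars_per_row_col)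

-- ===== LEMMAS AND PROOFS =====

-- single-step unfolding equations (proved by rfl; used instead of simp to control unfolding)
lemma sb_run_step_adv (dim stars : Int) (fuel : Nat) (idx : Int) (g : List (List Int))
    (rw cl : List Int) (stack : List (Int × Bool)) :
    sb_run dim stars (fuel + 1) true idx g rw cl stack =
      if idx = dim * dim then
        (if rw.sum == dim * stars then some g else sb_run dim stars fuel false idx g rw cl stack)
      else
        (if sb_valid dim stars g rw cl (PySem.Int.floordiv idx dim) (PySem.Int.mod idx dim) then
          sb_run dim stars fuel true (idx + 1)
            (sb_set2 g (PySem.Int.floordiv idx dim) (PySem.Int.mod idx dim) 1)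
            (sb_bump rw (PySem.Int.floordiv idx dim) 1) (sb_bump cl (PySem.Int.mod idx dim) 1)
            ((idx, true) :: stack)
        else sb_run dim stars fuel true (idx + 1) g rw cl ((idx, false) :: stack)) := rfl

lemma sb_run_step_pop (dim stars : Int) (fuel : Nat) (idx : Int) (g : List (List Int))
    (rw cl : List Int) (i : Int) (placed : Bool) (rest : List (Int × Bool)) :
    sb_run dim stars (fuel + 1) false idx g rw cl ((i, placed) :: rest) =
      if placed then
        sb_run dim stars fuel true (i + 1)
          (sb_set2 g (PySem.Int.floordiv i dim) (PySem.Int.mod i dim) 0)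
          (sb_bump rw (PySem.Int.floordiv i dim) (-1)) (sb_bump cl (PySem.Int.mod i dim) (-1))
          ((i, false) :: rest)
      else sb_run dim stars fuel false i g rw cl rest := rfl

lemma sb_solve_zero (dim stars : Int) (idx : Int) (g : List (List Int)) (rw cl : List Int) :
    sb_solve dim stars 0 idx g rw cl =
      if idx = dim * dim then (rw.sum == dim * stars, g, rw, cl) else (false, g, rw, cl) := rfl

lemma sb_solve_succ (dim stars : Int) (k : Nat) (idx : Int) (g : List (List Int)) (rw cl : List Int) :
    sb_solve dim stars (k + 1) idx g rw cl =
      if idx = dim * dim then (rw.sum == dim * stars, g, rw, cl)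
      else
        (if sb_valid dim stars g rw cl (PySem.Int.floordiv idx dim) (PySem.Int.mod idx dim) then
          match sb_solve dim stars k (idx + 1)
              (sb_set2 g (PySem.Int.floordiv idx dim) (PySem.Int.mod idx dim) 1)
              (sb_bump rw (PySem.Int.floordiv idx dim) 1) (sb_bump cl (PySem.Int.mod idx dim) 1) with
          | (true, g1, rw1, cl1) => (true, g1, rw1, cl1)
          | (false, g2, rw2, cl2) =>
            sb_solve dim stars k (idx + 1)
              (sb_set2 g2 (PySem.Int.floordiv idx dim) (PySem.Int.mod idx dim) 0)
              (sb_bump rw2 (PySem.Int.floordiv idx dim) (-1)) (sb_bump cl2 (PySem.Int.mod idx dim) (-1))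
        else sb_solve dim stars k (idx + 1) g rw cl) := rfl

-- in backtracking mode the machine never reads idx before overwriting it
lemma sb_run_false_idx (dim stars : Int) (fuel : Nat) (idx idx' : Int) (g : List (List Int))
    (rw cl : List Int) (stack : List (Int × Bool)) :
    sb_run dim stars fuel false idx g rw cl stack = sb_run dim stars fuel false idx' g rw cl stack := by
  cases fuel with
  | zero => rfl
  | succ f =>
    cases stack with
    | nil => rfl
    | cons p rest => rfl

lemma sb_run_false_nil (dim stars : Int) (fuel : Nat) (idx : Int) (g : List (List Int))
    (rw cl : List Int) (h : fuel ≠ 0) :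
    sb_run dim stars fuel false idx g rw cl [] = none := by
  cases fuel with
  | zero => exact absurd rfl h
  | succ f => rfl

-- the machine, started in advancing mode, simulates A's recursion: it returns the success grid,
-- or reaches backtracking mode with the same (undone) state and the original stack
lemma sb_key (dim stars : Int) :
    ∀ (k : Nat) (idx : Int) (g : List (List Int)) (rw cl : List Int) (stack : List (Int × Bool)),
      idx + (k : Int) = dim * dim →
      ∃ c : Nat, c ≤ 3 ^ (k + 1) ∧ ∀ fuel : Nat,
        sb_run dim stars (c + fuel) true idx g rw cl stack =
          (match sb_solve dim stars k idx g rw cl with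
           | (true, g1, _, _) => some g1
           | (false, g2, rw2, cl2) => sb_run dim stars fuel false 0 g2 rw2 cl2 stack) := by
  intro k
  induction k with
  | zero =>
    intro idx g rw cl stack h
    have hidx : idx = dim * dim := by push_cast at h; omega
    subst hidx
    refine ⟨1, by norm_num, ?_⟩
    intro fuel
    rw [Nat.add_comm, sb_run_step_adv, if_pos rfl, sb_solve_zero, if_pos rfl]
    cases hb : (rw.sum == dim * stars) with
    | true => rfl
    | false => exact sb_run_false_idx dim stars fuel (dim * dim) 0 g rw cl stack
  | succ k ih =>
    intro idx g rw cl stack h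
    have hne : ¬ (idx = dim * dim) := by push_cast at h; omega
    have harith : idx + 1 + (k : Int) = dim * dim := by push_cast at h ⊢; omega
    have h3 : 3 ≤ 3 ^ (k + 1) := by
      calc 3 = 3 ^ 1 := by norm_num
      _ ≤ 3 ^ (k + 1) := Nat.pow_le_pow_right (by norm_num) (by omega)
    have hpow : 3 ^ (k + 1 + 1) = 3 * 3 ^ (k + 1) := by ring
    by_cases hv : sb_valid dim stars g rw cl (PySem.Int.floordiv idx dim) (PySem.Int.mod idx dim) = true
    · -- star is placed first
      obtain ⟨c1, hc1, H1⟩ := ih (idx + 1)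
        (sb_set2 g (PySem.Int.floordiv idx dim) (PySem.Int.mod idx dim) 1)
        (sb_bump rw (PySem.Int.floordiv idx dim) 1) (sb_bump cl (PySem.Int.mod idx dim) 1)
        ((idx, true) :: stack) harith
      rcases hres : sb_solve dim stars k (idx + 1)
          (sb_set2 g (PySem.Int.floordiv idx dim) (PySem.Int.mod idx dim) 1)
          (sb_bump rw (PySem.Int.floordiv idx dim) 1) (sb_bump cl (PySem.Int.mod idx dim) 1)
        with ⟨b1, g1, rw1, cl1⟩
      cases b1 with
      | true =>
        refine ⟨c1 + 1, by omega, ?_⟩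
        intro fuel
        have e1 : c1 + 1 + fuel = (c1 + fuel) + 1 := by omega
        rw [e1, sb_run_step_adv, if_neg hne, if_pos hv, H1 fuel, hres,
          sb_solve_succ, if_neg hne, if_pos hv, hres]
      | false =>
        obtain ⟨c2, hc2, H2⟩ := ih (idx + 1)
          (sb_set2 g1 (PySem.Int.floordiv idx dim) (PySem.Int.mod idx dim) 0)
          (sb_bump rw1 (PySem.Int.floordiv idx dim) (-1)) (sb_bump cl1 (PySem.Int.mod idx dim) (-1))
          ((idx, false) :: stack) harith
        refine ⟨c1 + c2 + 3, by omega, ?_⟩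
        intro fuel
        have e1 : c1 + c2 + 3 + fuel = (c1 + (c2 + fuel + 2)) + 1 := by omega
        rw [e1, sb_run_step_adv, if_neg hne, if_pos hv, H1 (c2 + fuel + 2), hres]
        show sb_run dim stars (c2 + fuel + 2) false 0 g1 rw1 cl1 ((idx, true) :: stack) = _
        have e2 : c2 + fuel + 2 = (c2 + (fuel + 1)) + 1 := by omega
        rw [e2, sb_run_step_pop, if_pos rfl, H2 (fuel + 1)]
        rcases hres2 : sb_solve dim stars k (idx + 1)
            (sb_set2 g1 (PySem.Int.floordiv idx dim) (PySem.Int.mod idx dim) 0)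
            (sb_bump rw1 (PySem.Int.floordiv idx dim) (-1)) (sb_bump cl1 (PySem.Int.mod idx dim) (-1))
          with ⟨b2, g2, rw2, cl2⟩
        rw [sb_solve_succ, if_neg hne, if_pos hv, hres]
        show _ = (match sb_solve dim stars k (idx + 1)
            (sb_set2 g1 (PySem.Int.floordiv idx dim) (PySem.Int.mod idx dim) 0)
            (sb_bump rw1 (PySem.Int.floordiv idx dim) (-1)) (sb_bump cl1 (PySem.Int.mod idx dim) (-1)) with
          | (true, ga, _, _) => some ga
          | (false, gb, rwb, clb) => sb_run dim stars fuel false 0 gb rwb clb stack)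
        rw [hres2]
        cases b2 with
        | true => rfl
        | false => exact sb_run_false_idx dim stars fuel idx 0 g2 rw2 cl2 stack
    · -- cell invalid: only the skip branch
      obtain ⟨c1, hc1, H1⟩ := ih (idx + 1) g rw cl ((idx, false) :: stack) harith
      refine ⟨c1 + 2, by omega, ?_⟩
      intro fuel
      have e1 : c1 + 2 + fuel = (c1 + (fuel + 1)) + 1 := by omega
      rw [e1, sb_run_step_adv, if_neg hne, if_neg hv, H1 (fuel + 1)]
      rcases hres : sb_solve dim stars k (idx + 1) g rw cl with ⟨b1, g1, rw1, cl1⟩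
      rw [sb_solve_succ, if_neg hne, if_neg hv, hres]
      cases b1 with
      | true => rfl
      | false => exact sb_run_false_idx dim stars fuel idx 0 g1 rw1 cl1 stack

-- ===== VERDICT (by name: the statement is the Claim_ definition above) =====
theorem generate_solution_grid_spec : Claim_equal_generate_solution_grid := by
  intro dim stars _ _
  unfold Spec_generate_solution_grid generate_solution_grid generate_solution_grid_alt
  have hN : (0 : Int) + (((dim * dim).toNat : Nat) : Int) = dim * dim := by
    simp [Int.toNat_of_nonneg (mul_self_nonneg dim)]
  obtain ⟨c, hc, H⟩ := sb_key dim stars (dim * dim).toNat 0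
    (List.replicate dim.toNat (List.replicate dim.toNat (0 : Int)))
    (List.replicate dim.toNat (0 : Int)) (List.replicate dim.toNat (0 : Int)) [] hN
  have hlt : c < 3 ^ ((dim * dim).toNat + 2) := by
    have : 3 ^ ((dim * dim).toNat + 1) < 3 ^ ((dim * dim).toNat + 2) :=
      Nat.pow_lt_pow_right (by norm_num) (by omega)
    omega
  have hfuel : c + (3 ^ ((dim * dim).toNat + 2) - c) = 3 ^ ((dim * dim).toNat + 2) := by omega
  simp only []
  rw [← hfuel, H]
  rcases hres : sb_solve dim stars (dim * dim).toNat 0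
      (List.replicate dim.toNat (List.replicate dim.toNat (0 : Int)))
      (List.replicate dim.toNat (0 : Int)) (List.replicate dim.toNat (0 : Int))
    with ⟨b, g, rwx, clx⟩
  cases b with
  | true => rfl
  | false =>
    exact (sb_run_false_nil dim stars (3 ^ ((dim * dim).toNat + 2) - c) 0 g rwx clx (by omega)).symm
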